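-- pv_equiv track=rewrite | github.com/bfp11/Group-4-Intelligent-Workout-Diet-System | backend/utils/images.py | get_smart_food_image
-- ===== SOURCE A (Python) =====
-- def get_smart_food_image(food_name: str) -> str:
--     """Get appropriate food image using smart keyword matching"""
--     name_lower = food_name.lower()
--
--     # Chicken/Turkey
--     if any(word in name_lower for word in ['chicken', 'turkey']):
--         return 'https://images.pexels.com/photos/2338407/pexels-photo-2338407.jpeg?auto=compress&cs=tinysrgb&w=800'
--
--     # Salmon/Fish
--     if any(word in name_lower for word in ['salmon', 'fish', 'tuna']):
--         return 'https://images.pexels.com/photos/2374946/pexels-photo-2374946.jpeg?auto=compress&cs=tinysrgb&w=800'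
--
--     # Tofu/Plant-based
--     if any(word in name_lower for word in ['tofu', 'tempeh', 'seitan']):
--         return 'https://images.pexels.com/photos/4518604/pexels-photo-4518604.jpeg?auto=compress&cs=tinysrgb&w=800'
--
--     # Grains (Quinoa, Rice, Oats)
--     if any(word in name_lower for word in ['quinoa', 'rice', 'oat', 'oatmeal', 'grain', 'bowl', 'lentil']):
--         return 'https://images.pexels.com/photos/4224259/pexels-photo-4224259.jpeg?auto=compress&cs=tinysrgb&w=800'
--
--     # Yogurt/Dairy
--     if any(word in name_lower for word in ['yogurt', 'milk', 'cheese', 'cottage cheese', 'greek yogurt']):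
--         return 'https://images.pexels.com/photos/2992308/pexels-photo-2992308.jpeg?auto=compress&cs=tinysrgb&w=800'
--
--     # Eggs
--     if 'egg' in name_lower:
--         return 'https://images.pexels.com/photos/4397063/pexels-photo-4397063.jpeg?auto=compress&cs=tinysrgb&w=800'
--
--     # Vegetables
--     if any(word in name_lower for word in ['vegetable', 'broccoli', 'spinach', 'kale', 'salad', 'greens', 'carrot', 'pepper']):
--         return 'https://images.pexels.com/photos/6465182/pexels-photo-6465182.jpeg?auto=compress&cs=tinysrgb&w=800'
--
--     # Nuts/Seeds/Butter
--     if any(word in name_lower for word in ['almond', 'nut', 'peanut', 'seed', 'butter', 'cashew', 'walnut']):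
--         return 'https://images.pexels.com/photos/1295572/pexels-photo-1295572.jpeg?auto=compress&cs=tinysrgb&w=800'
--
--     # Fruits/Berries
--     if any(word in name_lower for word in ['fruit', 'berry', 'berries', 'apple', 'banana', 'strawberry', 'blueberry']):
--         return 'https://images.pexels.com/photos/1132047/pexels-photo-1132047.jpeg?auto=compress&cs=tinysrgb&w=800'
--
--     # Sweet Potato
--     if 'sweet potato' in name_lower or 'potato' in name_lower:
--         return 'https://images.pexels.com/photos/7456548/pexels-photo-7456548.jpeg?auto=compress&cs=tinysrgb&w=800'
--
--     # Avocado
--     if 'avocado' in name_lower: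
--         return 'https://images.pexels.com/photos/557659/pexels-photo-557659.jpeg?auto=compress&cs=tinysrgb&w=800'
--
--     # Pasta
--     if 'pasta' in name_lower:
--         return 'https://images.pexels.com/photos/1437267/pexels-photo-1437267.jpeg?auto=compress&cs=tinysrgb&w=800'
--
--     # Default food image
--     return 'https://images.pexels.com/photos/1640777/pexels-photo-1640777.jpeg?auto=compress&cs=tinysrgb&w=800'
-- ===== SOURCE B (Python) =====
-- # Flat keyword list with a numeric priority per keyword; one unconditional pass
-- # keeps the minimum-priority hit instead of an ordered early-return cascade.
-- _KEYWORDS = [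
--     ('chicken', 0), ('turkey', 0),
--     ('salmon', 1), ('fish', 1), ('tuna', 1),
--     ('tofu', 2), ('tempeh', 2), ('seitan', 2),
--     ('quinoa', 3), ('rice', 3), ('oat', 3), ('oatmeal', 3), ('grain', 3), ('bowl', 3), ('lentil', 3),
--     ('yogurt', 4), ('milk', 4), ('cheese', 4), ('cottage cheese', 4), ('greek yogurt', 4),
--     ('egg', 5),
--     ('vegetable', 6), ('broccoli', 6), ('spinach', 6), ('kale', 6), ('salad', 6), ('greens', 6), ('carrot', 6), ('pepper', 6),
--     ('almond', 7), ('nut', 7), ('peanut', 7), ('seed', 7), ('butter', 7), ('cashew', 7), ('walnut', 7),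
--     ('fruit', 8), ('berry', 8), ('berries', 8), ('apple', 8), ('banana', 8), ('strawberry', 8), ('blueberry', 8),
--     ('sweet potato', 9), ('potato', 9),
--     ('avocado', 10),
--     ('pasta', 11),
-- ]
--
-- _URLS = [
--     'https://images.pexels.com/photos/2338407/pexels-photo-2338407.jpeg?auto=compress&cs=tinysrgb&w=800',
--     'https://images.pexels.com/photos/2374946/pexels-photo-2374946.jpeg?auto=compress&cs=tinysrgb&w=800',
--     'https://images.pexels.com/photos/4518604/pexels-photo-4518604.jpeg?auto=compress&cs=tinysrgb&w=800',
--     'https://images.pexels.com/photos/4224259/pexels-photo-4224259.jpeg?auto=compress&cs=tinysrgb&w=800',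
--     'https://images.pexels.com/photos/2992308/pexels-photo-2992308.jpeg?auto=compress&cs=tinysrgb&w=800',
--     'https://images.pexels.com/photos/4397063/pexels-photo-4397063.jpeg?auto=compress&cs=tinysrgb&w=800',
--     'https://images.pexels.com/photos/6465182/pexels-photo-6465182.jpeg?auto=compress&cs=tinysrgb&w=800',
--     'https://images.pexels.com/photos/1295572/pexels-photo-1295572.jpeg?auto=compress&cs=tinysrgb&w=800',
--     'https://images.pexels.com/photos/1132047/pexels-photo-1132047.jpeg?auto=compress&cs=tinysrgb&w=800',
--     'https://images.pexels.com/photos/7456548/pexels-photo-7456548.jpeg?auto=compress&cs=tinysrgb&w=800',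
--     'https://images.pexels.com/photos/557659/pexels-photo-557659.jpeg?auto=compress&cs=tinysrgb&w=800',
--     'https://images.pexels.com/photos/1437267/pexels-photo-1437267.jpeg?auto=compress&cs=tinysrgb&w=800',
-- ]
--
-- _DEFAULT = 'https://images.pexels.com/photos/1640777/pexels-photo-1640777.jpeg?auto=compress&cs=tinysrgb&w=800'
--
--
-- def get_smart_food_image(food_name: str) -> str:
--     """Get appropriate food image: best (lowest-priority) matching keyword wins."""
--     name = food_name.lower()
--     best = None
--     for kw, prio in _KEYWORDS:
--         if kw in name and (best is None or prio < best):
--             best = prio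
--     return _URLS[best] if best is not None else _DEFAULT
-- ===== Notes on version B (the rewrite author's own statement) =====
-- stated objective: alternative
-- what changed: Instead of an ordered early-return cascade over keyword groups, B makes one unconditional pass over a flat (keyword, priority) list keeping the minimum matched priority, then indexes a URL array with it; correctness holds because priorities are nondecreasing in list order, so the minimum priority equals the first matching group.
import Mathlib
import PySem

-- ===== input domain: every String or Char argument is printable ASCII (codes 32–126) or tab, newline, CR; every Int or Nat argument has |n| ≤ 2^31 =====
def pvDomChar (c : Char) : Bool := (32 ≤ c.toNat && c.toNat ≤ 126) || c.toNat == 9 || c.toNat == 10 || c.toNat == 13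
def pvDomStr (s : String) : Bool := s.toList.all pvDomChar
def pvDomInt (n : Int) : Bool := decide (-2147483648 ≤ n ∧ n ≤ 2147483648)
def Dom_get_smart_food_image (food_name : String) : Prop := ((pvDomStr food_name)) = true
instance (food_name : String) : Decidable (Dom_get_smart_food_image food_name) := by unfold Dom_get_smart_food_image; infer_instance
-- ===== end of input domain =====

-- B replaces A's ordered early-return keyword cascade with one unconditional pass over a flat
-- (keyword, priority) list keeping the minimum matched priority, then indexes a URL array (alternative).

-- ===== PORT A =====
def get_smart_food_image (food_name : String) : String :=
  let name_lower := PySem.Str.lower food_name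
  if ["chicken", "turkey"].any (fun word => PySem.Str.isIn word name_lower) then
    "https://images.pexels.com/photos/2338407/pexels-photo-2338407.jpeg?auto=compress&cs=tinysrgb&w=800"
  else
  if ["salmon", "fish", "tuna"].any (fun word => PySem.Str.isIn word name_lower) then
    "https://images.pexels.com/photos/2374946/pexels-photo-2374946.jpeg?auto=compress&cs=tinysrgb&w=800"
  else
  if ["tofu", "tempeh", "seitan"].any (fun word => PySem.Str.isIn word name_lower) then
    "https://images.pexels.com/photos/4518604/pexels-photo-4518604.jpeg?auto=compress&cs=tinysrgb&w=800"
  else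
  if ["quinoa", "rice", "oat", "oatmeal", "grain", "bowl", "lentil"].any (fun word => PySem.Str.isIn word name_lower) then
    "https://images.pexels.com/photos/4224259/pexels-photo-4224259.jpeg?auto=compress&cs=tinysrgb&w=800"
  else
  if ["yogurt", "milk", "cheese", "cottage cheese", "greek yogurt"].any (fun word => PySem.Str.isIn word name_lower) then
    "https://images.pexels.com/photos/2992308/pexels-photo-2992308.jpeg?auto=compress&cs=tinysrgb&w=800"
  else
  if PySem.Str.isIn "egg" name_lower then
    "https://images.pexels.com/photos/4397063/pexels-photo-4397063.jpeg?auto=compress&cs=tinysrgb&w=800"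
  else
  if ["vegetable", "broccoli", "spinach", "kale", "salad", "greens", "carrot", "pepper"].any (fun word => PySem.Str.isIn word name_lower) then
    "https://images.pexels.com/photos/6465182/pexels-photo-6465182.jpeg?auto=compress&cs=tinysrgb&w=800"
  else
  if ["almond", "nut", "peanut", "seed", "butter", "cashew", "walnut"].any (fun word => PySem.Str.isIn word name_lower) then
    "https://images.pexels.com/photos/1295572/pexels-photo-1295572.jpeg?auto=compress&cs=tinysrgb&w=800"
  else
  if ["fruit", "berry", "berries", "apple", "banana", "strawberry", "blueberry"].any (fun word => PySem.Str.isIn word name_lower) then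
    "https://images.pexels.com/photos/1132047/pexels-photo-1132047.jpeg?auto=compress&cs=tinysrgb&w=800"
  else
  if ["sweet potato", "potato"].any (fun word => PySem.Str.isIn word name_lower) then
    "https://images.pexels.com/photos/7456548/pexels-photo-7456548.jpeg?auto=compress&cs=tinysrgb&w=800"
  else
  if PySem.Str.isIn "avocado" name_lower then
    "https://images.pexels.com/photos/557659/pexels-photo-557659.jpeg?auto=compress&cs=tinysrgb&w=800"
  else
  if PySem.Str.isIn "pasta" name_lower then
    "https://images.pexels.com/photos/1437267/pexels-photo-1437267.jpeg?auto=compress&cs=tinysrgb&w=800"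
  else
  "https://images.pexels.com/photos/1640777/pexels-photo-1640777.jpeg?auto=compress&cs=tinysrgb&w=800"

-- ===== PORT B =====
-- flat (keyword, priority) list, exactly _KEYWORDS in Source B
def pvKeywords : List (String × Nat) := [
  ("chicken", 0), ("turkey", 0),
  ("salmon", 1), ("fish", 1), ("tuna", 1),
  ("tofu", 2), ("tempeh", 2), ("seitan", 2),
  ("quinoa", 3), ("rice", 3), ("oat", 3), ("oatmeal", 3), ("grain", 3), ("bowl", 3), ("lentil", 3),
  ("yogurt", 4), ("milk", 4), ("cheese", 4), ("cottage cheese", 4), ("greek yogurt", 4),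
  ("egg", 5),
  ("vegetable", 6), ("broccoli", 6), ("spinach", 6), ("kale", 6), ("salad", 6), ("greens", 6), ("carrot", 6), ("pepper", 6),
  ("almond", 7), ("nut", 7), ("peanut", 7), ("seed", 7), ("butter", 7), ("cashew", 7), ("walnut", 7),
  ("fruit", 8), ("berry", 8), ("berries", 8), ("apple", 8), ("banana", 8), ("strawberry", 8), ("blueberry", 8),
  ("sweet potato", 9), ("potato", 9),
  ("avocado", 10),
  ("pasta", 11)]

-- _URLS in Source B
def pvUrls : List String := [
  "https://images.pexels.com/photos/2338407/pexels-photo-2338407.jpeg?auto=compress&cs=tinysrgb&w=800",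
  "https://images.pexels.com/photos/2374946/pexels-photo-2374946.jpeg?auto=compress&cs=tinysrgb&w=800",
  "https://images.pexels.com/photos/4518604/pexels-photo-4518604.jpeg?auto=compress&cs=tinysrgb&w=800",
  "https://images.pexels.com/photos/4224259/pexels-photo-4224259.jpeg?auto=compress&cs=tinysrgb&w=800",
  "https://images.pexels.com/photos/2992308/pexels-photo-2992308.jpeg?auto=compress&cs=tinysrgb&w=800",
  "https://images.pexels.com/photos/4397063/pexels-photo-4397063.jpeg?auto=compress&cs=tinysrgb&w=800",
  "https://images.pexels.com/photos/6465182/pexels-photo-6465182.jpeg?auto=compress&cs=tinysrgb&w=800",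
  "https://images.pexels.com/photos/1295572/pexels-photo-1295572.jpeg?auto=compress&cs=tinysrgb&w=800",
  "https://images.pexels.com/photos/1132047/pexels-photo-1132047.jpeg?auto=compress&cs=tinysrgb&w=800",
  "https://images.pexels.com/photos/7456548/pexels-photo-7456548.jpeg?auto=compress&cs=tinysrgb&w=800",
  "https://images.pexels.com/photos/557659/pexels-photo-557659.jpeg?auto=compress&cs=tinysrgb&w=800",
  "https://images.pexels.com/photos/1437267/pexels-photo-1437267.jpeg?auto=compress&cs=tinysrgb&w=800"]

def pvDefaultFoodImage : String := "https://images.pexels.com/photos/1640777/pexels-photo-1640777.jpeg?auto=compress&cs=tinysrgb&w=800"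

-- the for-loop of Source B: fold keeping the minimum priority among matching keywords
def pvBestLoop (name : String) (best : Option Nat) : List (String × Nat) → Option Nat
  | [] => best
  | (kw, prio) :: rest =>
      pvBestLoop name
        (if PySem.Str.isIn kw name && (match best with | none => true | some b => decide (prio < b))
         then some prio else best) rest

def get_smart_food_image_alt (food_name : String) : String :=
  let name := PySem.Str.lower food_name
  match pvBestLoop name none pvKeywords with
  | some best => pvUrls.getD best pvDefaultFoodImage   -- _URLS[best]; indices are in range by construction
  | none => pvDefaultFoodImage

-- ===== PRECONDITION & SPEC =====
def Spec_get_smart_food_image (food_name : String) (out : String) : Prop := out = get_smart_food_image_alt food_name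
instance (food_name : String) (out : String) : Decidable (Spec_get_smart_food_image food_name out) := by unfold Spec_get_smart_food_image; infer_instance

-- ===== CLAIM =====
def Claim_equal_get_smart_food_image : Prop := ∀ (food_name : String), Dom_get_smart_food_image food_name → Spec_get_smart_food_image food_name (get_smart_food_image food_name)

-- ===== LEMMAS AND PROOFS =====

-- first-match scan used only as a proof-side characterisation of the fold
def pvFirstPrio (name : String) : List (String × Nat) → Option Nat
  | [] => none
  | (kw, prio) :: rest =>
      if PySem.Str.isIn kw name then some prio else pvFirstPrio name rest

-- once best is set and no later priority beats it, the fold keeps it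
lemma pvBestLoop_stuck (name : String) (b : Nat) (l : List (String × Nat))
    (h : ∀ e ∈ l, b ≤ e.2) : pvBestLoop name (some b) l = some b := by
  induction l with
  | nil => rfl
  | cons e rest ih =>
    obtain ⟨kw, prio⟩ := e
    have hb : b ≤ prio := h _ (List.mem_cons_self ..)
    simp only [pvBestLoop, Nat.not_lt_of_le hb, decide_false, Bool.and_false, if_neg Bool.false_ne_true]
    exact ih fun e he => h e (List.mem_cons_of_mem _ he)

-- on a priority-nondecreasing list, minimum matched priority = first matched priority
lemma pvBestLoop_eq_first (name : String) (l : List (String × Nat))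
    (h : l.Pairwise fun a b => a.2 ≤ b.2) :
    pvBestLoop name none l = pvFirstPrio name l := by
  induction l with
  | nil => rfl
  | cons e rest ih =>
    obtain ⟨kw, prio⟩ := e
    rw [List.pairwise_cons] at h
    by_cases hin : PySem.Str.isIn kw name = true
    · simp only [pvBestLoop, pvFirstPrio, hin, Bool.true_and, if_true]
      exact pvBestLoop_stuck name prio rest h.1
    · simp only [pvBestLoop, pvFirstPrio, hin, Bool.false_and, if_neg Bool.false_ne_true]
      exact ih h.2

-- turn the match-on-Option into a function so 'if' distributes through it
def pvExtract (o : Option Nat) : String :=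
  match o with
  | some best => pvUrls.getD best pvDefaultFoodImage
  | none => pvDefaultFoodImage

lemma pvExtract_ite (c : Prop) [Decidable c] (a b : Option Nat) :
    pvExtract (if c then a else b) = if c then pvExtract a else pvExtract b :=
  apply_ite pvExtract c a b

-- split a disjunctive guard into the cascade shape
lemma pv_if_or {α : Type} (a b : Bool) (x y : α) :
    (if (a || b) = true then x else y) = if a = true then x else if b = true then x else y := by
  cases a <;> simp

-- ===== VERDICT =====
theorem get_smart_food_image_spec : Claim_equal_get_smart_food_image := by
  intro food_name _
  show _ = _
  rw [get_smart_food_image_alt]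
  rw [pvBestLoop_eq_first _ _ (by decide)]
  show get_smart_food_image food_name =
    pvExtract (pvFirstPrio (PySem.Str.lower food_name) pvKeywords)
  simp only [pvKeywords, pvFirstPrio, pvExtract_ite]
  simp only [pvExtract, pvUrls, pvDefaultFoodImage, List.getD, List.getElem?_cons_zero,
    List.getElem?_cons_succ, Option.getD_some]
  simp only [get_smart_food_image, List.any_cons, List.any_nil, Bool.or_false, pv_if_or]
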